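-- pv_equiv track=rewrite | github.com/NazarenOMICS/Programming-Coursework-Projects | Obligatorios del curso/Obligatorio 1/OBLIGATORIO 1 Nazareno Cabrera y Gaston Silva.py | intercalar_inverso
-- ===== SOURCE A (Python) =====
-- def intercalar_inverso(secuencia1, secuencia2):
--     # Invertir la secuencia2
--     secuencia2_invertida = secuencia2[::-1]
--
--     # Determinar la longitud de cada secuencia
--     len_secuencia1 = len(secuencia1)
--     len_secuencia2 = len(secuencia2_invertida)
--
--     # Determinar la longitud máxima
--     max_len = max(len_secuencia1, len_secuencia2)
--
--     # Inicializar la nueva secuencia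
--     nueva_secuencia = ""
--
--     # Intercalar las bases de las secuencias
--     for x in range(max_len):
--         if x < len_secuencia1:
--             nueva_secuencia += secuencia1[x]
--         if x < len_secuencia2:
--             nueva_secuencia += secuencia2_invertida[x]
--
--     return nueva_secuencia
-- ===== SOURCE B (Python) =====
-- def intercalar_inverso(secuencia1, secuencia2):
--     # Two-phase formulation: interleave the common prefix pairwise with zip,
--     # then append the untouched tail of whichever string is longer.
--     s2r = secuencia2[::-1]
--     pares = ''.join(c1 + c2 for c1, c2 in zip(secuencia1, s2r))
--     return pares + secuencia1[len(s2r):] + s2r[len(secuencia1):]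
-- ===== Notes on version B (the rewrite author's own statement) =====
-- stated objective: idiomatic
-- what changed: Replaces the index loop over range(max_len) with per-index bound checks and character-by-character string concatenation by a two-phase decomposition: zip-interleave the common prefix in one join, then append the leftover tail of the longer string by slicing.
import Mathlib
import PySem

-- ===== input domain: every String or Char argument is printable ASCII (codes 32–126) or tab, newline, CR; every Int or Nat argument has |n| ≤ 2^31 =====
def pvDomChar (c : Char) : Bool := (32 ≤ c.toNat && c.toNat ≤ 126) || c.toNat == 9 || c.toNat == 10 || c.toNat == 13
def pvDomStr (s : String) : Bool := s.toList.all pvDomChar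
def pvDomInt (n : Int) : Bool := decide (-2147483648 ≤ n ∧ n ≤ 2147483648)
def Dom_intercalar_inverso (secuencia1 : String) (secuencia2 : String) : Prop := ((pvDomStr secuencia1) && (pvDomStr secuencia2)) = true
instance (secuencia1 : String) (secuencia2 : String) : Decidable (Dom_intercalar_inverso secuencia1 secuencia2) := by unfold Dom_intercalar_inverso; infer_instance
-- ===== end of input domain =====

-- B replaces A's index loop with character appends by a zip-interleave of the common prefix plus the longer string's tail (idiomatic decomposition).


-- ===== PORT A =====
-- loop body of A's 'for x in range(max_len)' (two guarded character appends)
def pasoA (l1 l2i : List Char) (acc : List Char) (x : Int) : List Char :=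
  let acc := if x < PySem.Chars.len l1 then acc ++ ((PySem.List.pyGet? l1 x).map (fun c => [c])).getD [] else acc
  if x < PySem.Chars.len l2i then acc ++ ((PySem.List.pyGet? l2i x).map (fun c => [c])).getD [] else acc

def intercalar_inverso (secuencia1 : String) (secuencia2 : String) : String :=
  -- secuencia2_invertida = secuencia2[::-1]
  let secuencia2_invertida : List Char := (PySem.List.slice? secuencia2.toList none none (-1)).getD []
  let len_secuencia1 : Int := PySem.Chars.len secuencia1.toList
  let len_secuencia2 : Int := PySem.Chars.len secuencia2_invertida
  let max_len : Int := max len_secuencia1 len_secuencia2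
  let nueva_secuencia : List Char :=
    (PySem.List.pyRange 0 max_len 1).foldl (pasoA secuencia1.toList secuencia2_invertida) []
  String.ofList nueva_secuencia

-- ===== PORT B =====
def intercalar_inverso_alt (secuencia1 : String) (secuencia2 : String) : String :=
  let a := secuencia1.toList
  let s2r := (PySem.List.slice? secuencia2.toList none none (-1)).getD []
  let pares := (a.zip s2r).flatMap (fun p => [p.1, p.2])
  String.ofList (pares ++ a.drop s2r.length ++ s2r.drop a.length)

-- ===== PRECONDITION & SPEC =====
def Spec_intercalar_inverso (secuencia1 : String) (secuencia2 : String) (out : String) : Prop := out = intercalar_inverso_alt secuencia1 secuencia2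
instance (secuencia1 : String) (secuencia2 : String) (out : String) : Decidable (Spec_intercalar_inverso secuencia1 secuencia2 out) := by unfold Spec_intercalar_inverso; infer_instance

-- ===== CLAIM (what is proved, stated in full; the proofs are below) =====
def Claim_equal_intercalar_inverso : Prop := ∀ (secuencia1 : String) (secuencia2 : String), Dom_intercalar_inverso secuencia1 secuencia2 → Spec_intercalar_inverso secuencia1 secuencia2 (intercalar_inverso secuencia1 secuencia2)

-- ===== LEMMAS AND PROOFS =====
-- B's result as a function of lists (zip-interleave plus leftover tails)
def interB (x y : List Char) : List Char :=
  (x.zip y).flatMap (fun p => [p.1, p.2]) ++ x.drop y.length ++ y.drop x.length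

lemma interB_step (x y : List Char) :
    interB x y = ((x.head?.map (fun c => [c])).getD []) ++ ((y.head?.map (fun c => [c])).getD []) ++ interB x.tail y.tail := by
  cases x <;> cases y <;> simp [interB]

lemma loopA_eq (n : Nat) : ∀ (a b : List Char) (k : Nat) (acc : List Char),
    max a.length b.length ≤ k + n →
    (PySem.List.pyRange (k : Int) (max (PySem.Chars.len a) (PySem.Chars.len b)) 1).foldl (pasoA a b) acc
      = acc ++ interB (a.drop k) (b.drop k) := by
  induction n with
  | zero =>
    intro a b k acc h
    rw [PySem.List.pyRange_one_eq_nil (by simp [PySem.Chars.len_eq]; omega)]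
    have ha : a.drop k = [] := List.drop_eq_nil_of_le (by omega)
    have hb : b.drop k = [] := List.drop_eq_nil_of_le (by omega)
    simp [ha, hb, interB]
  | succ n ih =>
    intro a b k acc h
    by_cases hk : max a.length b.length ≤ k
    · rw [PySem.List.pyRange_one_eq_nil (by simp [PySem.Chars.len_eq]; omega)]
      have ha : a.drop k = [] := List.drop_eq_nil_of_le (by omega)
      have hb : b.drop k = [] := List.drop_eq_nil_of_le (by omega)
      simp [ha, hb, interB]
    · rw [PySem.List.pyRange_one_cons (by simp [PySem.Chars.len_eq]; omega)]
      rw [List.foldl_cons]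
      have hcast : ((k : Int) + 1) = ((k + 1 : Nat) : Int) := by push_cast; ring
      rw [hcast, ih a b (k + 1) _ (by omega)]
      conv_rhs => rw [interB_step, List.tail_drop, List.tail_drop, List.head?_drop, List.head?_drop]
      unfold pasoA
      by_cases h1 : k < a.length <;> by_cases h2 : k < b.length <;>
        simp [PySem.Chars.len_eq, h1, h2, List.append_assoc]

-- ===== VERDICT (by name: the statement is the Claim_ definition above) =====
theorem intercalar_inverso_spec : Claim_equal_intercalar_inverso := by
  intro s1 s2 _
  unfold Spec_intercalar_inverso intercalar_inverso intercalar_inverso_alt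
  simp only [PySem.List.slice?_none_none_neg_one, Option.getD_some]
  congr 1
  have h := loopA_eq (max s1.toList.length s2.toList.reverse.length)
    s1.toList s2.toList.reverse 0 [] (by omega)
  simpa [interB] using h
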